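-- pv_equiv track=rewrite | github.com/AMCAS2020/mechanics | LeafInterrogator/leafi/helper.py | initialize_image_dict_from_list
-- ===== SOURCE A (Python) =====
-- def initialize_image_dict_from_list(image_list, dict_of_leaflets, on_leaflets=False):
--     counter = 1
--     image_dict = {}
--
--     if on_leaflets:
--         for image in image_list:
--             leaflets = dict_of_leaflets[image]
--             if leaflets:
--                 for leaflet in leaflets:
--                     image_dict[counter] = leaflet
--                     counter += 1
--             else:
--                 image_dict[counter] = image
--                 counter += 1
--     else:
--         for image in image_list:
--             image_dict[counter] = image
--             counter += 1
--
--     return image_dict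
-- ===== SOURCE B (Python) =====
-- def initialize_image_dict_from_list(image_list, dict_of_leaflets, on_leaflets=False):
--     # Staged: 1) per-image value chunks, 2) prefix-sum offsets, 3) one dict
--     # comprehension keyed by offset + position (no running counter).
--     if on_leaflets:
--         chunks = [dict_of_leaflets[image] or [image] for image in image_list]
--     else:
--         chunks = [[image] for image in image_list]
--     offsets = [1]
--     for chunk in chunks:
--         offsets.append(offsets[-1] + len(chunk))
--     return {off + j: v
--             for chunk, off in zip(chunks, offsets)
--             for j, v in enumerate(chunk)}
-- ===== Notes on version B (the rewrite author's own statement) =====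
-- stated objective: alternative
-- what changed: B replaces A's single pass carrying a running counter and an incrementally-built dict by three stages: a list of per-image value chunks, a prefix-sum list of starting offsets, and one dict comprehension whose keys are offset + position in chunk.
import Mathlib
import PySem

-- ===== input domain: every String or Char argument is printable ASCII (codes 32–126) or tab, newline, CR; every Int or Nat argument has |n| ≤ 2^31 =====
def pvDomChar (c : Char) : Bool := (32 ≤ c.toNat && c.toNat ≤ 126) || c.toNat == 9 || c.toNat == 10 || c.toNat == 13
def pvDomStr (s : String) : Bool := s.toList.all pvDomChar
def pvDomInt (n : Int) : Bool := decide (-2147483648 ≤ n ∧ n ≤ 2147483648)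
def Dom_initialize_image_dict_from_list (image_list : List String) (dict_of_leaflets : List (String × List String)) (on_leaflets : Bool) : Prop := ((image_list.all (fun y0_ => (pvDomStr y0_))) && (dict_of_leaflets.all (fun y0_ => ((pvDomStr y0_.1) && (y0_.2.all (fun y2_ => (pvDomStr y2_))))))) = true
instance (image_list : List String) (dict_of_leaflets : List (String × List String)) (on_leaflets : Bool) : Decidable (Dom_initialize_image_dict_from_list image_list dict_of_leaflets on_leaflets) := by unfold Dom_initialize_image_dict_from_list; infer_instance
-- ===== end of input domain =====

-- B replaces A's single pass with a running counter by three stages: per-image value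
-- chunks, prefix-sum offsets, and one dict comprehension keyed by offset + position
-- (objective: alternative decomposition, same cost).

-- ===== PORT A =====
-- A's loops: a fold carrying the state (counter, image_dict); dict_of_leaflets[image]
-- is getD under Pre_ (membership of every image), where Python would raise KeyError.
def initialize_image_dict_from_list (image_list : List String) (dict_of_leaflets : List (String × List String)) (on_leaflets : Bool) : List (Int × String) :=
  let init : Int × PySem.Dict Int String := (1, PySem.Dict.empty)
  let st :=
    if on_leaflets then
      image_list.foldl (fun st image =>
        let leaflets := (PySem.Dict.mk dict_of_leaflets).getD image []
        if leaflets ≠ [] then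
          leaflets.foldl (fun st leaflet => (st.1 + 1, st.2.insert st.1 leaflet)) st
        else
          (st.1 + 1, st.2.insert st.1 image)) init
    else
      image_list.foldl (fun st image => (st.1 + 1, st.2.insert st.1 image)) init
  st.2.items

-- ===== PORT B =====
-- Source B: chunks, then prefix-sum offsets (offsets[-1] is getLast?.getD 0; the list is
-- never empty so the default is never used), then the dict comprehension: the inner
-- 'for j, v in enumerate(chunk)' with key off + j is PySem.List.enumerate chunk off.
def initialize_image_dict_from_list_alt (image_list : List String) (dict_of_leaflets : List (String × List String)) (on_leaflets : Bool) : List (Int × String) :=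
  let chunks : List (List String) :=
    if on_leaflets then
      image_list.map (fun image =>
        let l := (PySem.Dict.mk dict_of_leaflets).getD image []
        if l ≠ [] then l else [image])
    else
      image_list.map (fun image => [image])
  let offsets : List Int :=
    chunks.foldl (fun os chunk => os ++ [(os.getLast?.getD 0) + chunk.length]) [1]
  (PySem.Dict.ofList ((chunks.zip offsets).flatMap
      (fun p => PySem.List.enumerate p.1 p.2))).items

-- ===== PRECONDITION & SPEC =====
-- Pre_ excludes exactly the inputs where the Python A raises KeyError (on_leaflets set
-- and some image missing from dict_of_leaflets); B raises the same KeyError there.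
def Pre_initialize_image_dict_from_list (image_list : List String) (dict_of_leaflets : List (String × List String)) (on_leaflets : Bool) : Prop :=
  on_leaflets = true → ∀ image ∈ image_list, image ∈ dict_of_leaflets.map Prod.fst
instance (image_list : List String) (dict_of_leaflets : List (String × List String)) (on_leaflets : Bool) : Decidable (Pre_initialize_image_dict_from_list image_list dict_of_leaflets on_leaflets) := by unfold Pre_initialize_image_dict_from_list; infer_instance
def pvWitness_initialize_image_dict_from_list : List String × (List (String × List String)) × Bool :=
  (["a", "b"], [("a", ["x", "y"]), ("b", [])], true)
def Spec_initialize_image_dict_from_list (image_list : List String) (dict_of_leaflets : List (String × List String)) (on_leaflets : Bool) (out : List (Int × String)) : Prop := out = initialize_image_dict_from_list_alt image_list dict_of_leaflets on_leaflets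
instance (image_list : List String) (dict_of_leaflets : List (String × List String)) (on_leaflets : Bool) (out : List (Int × String)) : Decidable (Spec_initialize_image_dict_from_list image_list dict_of_leaflets on_leaflets out) := by unfold Spec_initialize_image_dict_from_list; infer_instance

-- ===== CLAIM (what is proved, stated in full; the proofs are below) =====
def Claim_equal_initialize_image_dict_from_list : Prop := ∀ (image_list : List String) (dict_of_leaflets : List (String × List String)) (on_leaflets : Bool), Dom_initialize_image_dict_from_list image_list dict_of_leaflets on_leaflets → Pre_initialize_image_dict_from_list image_list dict_of_leaflets on_leaflets → Spec_initialize_image_dict_from_list image_list dict_of_leaflets on_leaflets (initialize_image_dict_from_list image_list dict_of_leaflets on_leaflets)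

-- ===== LEMMAS AND PROOFS =====

-- A's inner insert loop over a value list ws, started at counter c on a dict whose keys
-- are all < c, appends exactly enumerate ws c and leaves the counter at c + |ws|.
theorem flat_fold (ws : List String) (c : Int) (d : PySem.Dict Int String)
    (hk : ∀ k ∈ d.keys, k < c) :
    ws.foldl (fun st w => (st.1 + 1, st.2.insert st.1 w)) (c, d)
      = (c + ws.length, PySem.Dict.mk (d.items ++ PySem.List.enumerate ws c)) := by
  induction ws generalizing c d with
  | nil => simp
  | cons w ws ih =>
    have hfresh : d.contains c = false := by
      rw [PySem.Dict.contains_eq_decide_mem_keys]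
      simp only [decide_eq_false_iff_not]
      intro hmem; exact absurd (hk c hmem) (lt_irrefl c)
    have hk' : ∀ k ∈ (d.insert c w).keys, k < c + 1 := by
      intro k hmem
      rcases (PySem.Dict.mem_keys_insert d c k w).1 hmem with h | h
      · omega
      · have := hk k h; omega
    simp only [List.foldl_cons]
    rw [ih (c + 1) (d.insert c w) hk']
    simp only [Prod.mk.injEq]
    constructor
    · simp; ring
    · congr 1
      rw [PySem.Dict.items_insert_of_not_contains d w hfresh,
          PySem.List.enumerate_cons]
      simp

-- keys of enumerate ws c lie in [c, c + |ws|)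
theorem keys_enumerate_lt (ws : List String) (c k : Int)
    (h : k ∈ (PySem.List.enumerate ws c).map Prod.fst) : c ≤ k ∧ k < c + ws.length := by
  rw [PySem.List.map_fst_enumerate] at h
  exact PySem.List.mem_pyRange_one.1 h

-- A's outer on_leaflets fold equals the flat fold over the concatenation of the
-- per-image value chunks.
theorem outer_fold_eq (dl : List (String × List String)) (il : List String) (c : Int)
    (d : PySem.Dict Int String) (hk : ∀ k ∈ d.keys, k < c) :
    il.foldl (fun st image =>
        let leaflets := (PySem.Dict.mk dl).getD image []
        if leaflets ≠ [] then
          leaflets.foldl (fun st leaflet => (st.1 + 1, st.2.insert st.1 leaflet)) st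
        else
          (st.1 + 1, st.2.insert st.1 image)) (c, d)
      = (c + (il.flatMap (fun image =>
            let leaflets := (PySem.Dict.mk dl).getD image []
            if leaflets ≠ [] then leaflets else [image])).length,
         PySem.Dict.mk (d.items ++
            PySem.List.enumerate (il.flatMap (fun image =>
              let leaflets := (PySem.Dict.mk dl).getD image []
              if leaflets ≠ [] then leaflets else [image])) c)) := by
  induction il generalizing c d with
  | nil => simp
  | cons x il ih =>
    set ws := (PySem.Dict.mk dl).getD x [] with hws
    have hstep : (fun (st : Int × PySem.Dict Int String) image =>
        let leaflets := (PySem.Dict.mk dl).getD image []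
        if leaflets ≠ [] then
          leaflets.foldl (fun st leaflet => (st.1 + 1, st.2.insert st.1 leaflet)) st
        else
          (st.1 + 1, st.2.insert st.1 image)) (c, d) x
        = (if ws ≠ [] then ws else [x]).foldl
            (fun st w => (st.1 + 1, st.2.insert st.1 w)) (c, d) := by
      by_cases h : ws = [] <;> simp [h, ← hws]
    set chunk := if ws ≠ [] then ws else [x] with hchunk
    have hflat := flat_fold chunk c d hk
    have hk2 : ∀ k ∈ (PySem.Dict.mk (d.items ++ PySem.List.enumerate chunk c)).keys,
        k < c + chunk.length := by
      intro k hmem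
      simp only [PySem.Dict.keys_mk, List.map_append, List.mem_append] at hmem
      rcases hmem with h | h
      · have := hk k h; omega
      · exact (keys_enumerate_lt chunk c k h).2
    simp only [List.foldl_cons, hstep, hflat]
    rw [ih (c + chunk.length) _ hk2]
    have hflatMap : (x :: il).flatMap (fun image =>
        let leaflets := (PySem.Dict.mk dl).getD image []
        if leaflets ≠ [] then leaflets else [image])
        = chunk ++ il.flatMap (fun image =>
            let leaflets := (PySem.Dict.mk dl).getD image []
            if leaflets ≠ [] then leaflets else [image]) := by
      by_cases h : ws = [] <;>
        simp [List.flatMap_cons, ← hws, hchunk, h]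
    rw [hflatMap]
    simp only [Prod.mk.injEq]
    constructor
    · simp; ring
    · congr 1
      rw [PySem.List.enumerate_append]
      simp

-- enumerate has pairwise-distinct keys, so dict-building keeps the list as is.
theorem ofList_enumerate_items (ws : List String) (c : Int) :
    (PySem.Dict.ofList (PySem.List.enumerate ws c)).items = PySem.List.enumerate ws c := by
  have hnd : ((PySem.List.enumerate ws c).map Prod.fst).Nodup := by
    apply List.Pairwise.map
    · intro a b h; exact Int.ne_of_lt h
    · exact PySem.List.pairwise_lt_enumerate ws c
  have := PySem.Dict.items_foldl_insert_fresh (PySem.List.enumerate ws c)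
      Prod.fst Prod.snd PySem.Dict.empty (by simp) hnd
  simpa [PySem.Dict.ofList] using this

-- the tail of B's offsets list: running prefix sums of the chunk lengths after c
def tailOffsets : List (List String) → Int → List Int
  | [], _ => []
  | ch :: chs, c => (c + (ch.length : Int)) :: tailOffsets chs (c + (ch.length : Int))

-- B's offsets loop, started on a nonempty prefix ending in c, appends tailOffsets.
theorem offsets_fold (chunks : List (List String)) (pre : List Int) (c : Int)
    (h : pre.getLast? = some c) :
    chunks.foldl (fun os chunk => os ++ [(os.getLast?.getD 0) + (chunk.length : Int)]) pre
      = pre ++ tailOffsets chunks c := by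
  induction chunks generalizing pre c with
  | nil => simp [tailOffsets]
  | cons ch chs ih =>
    simp only [List.foldl_cons]
    rw [h]
    simp only [Option.getD_some]
    have h' : (pre ++ [c + (ch.length : Int)]).getLast? = some (c + (ch.length : Int)) := by
      simp
    rw [ih (pre ++ [c + (ch.length : Int)]) (c + (ch.length : Int)) h']
    simp [tailOffsets]

-- zipping chunks with their offsets and enumerating each chunk from its offset is
-- exactly enumerating the flattened chunks once.
theorem zip_offsets_flatMap (chunks : List (List String)) (c : Int) :
    ((chunks.zip (c :: tailOffsets chunks c)).flatMap
        (fun p => PySem.List.enumerate p.1 p.2))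
      = PySem.List.enumerate chunks.flatten c := by
  induction chunks generalizing c with
  | nil => simp
  | cons ch chs ih =>
    simp only [tailOffsets, List.zip_cons_cons, List.flatMap_cons, List.flatten_cons]
    rw [ih (c + (ch.length : Int)), PySem.List.enumerate_append]

-- flattening singleton chunks gives back the list
theorem flatten_map_singleton (il : List String) :
    (il.map (fun image => [image])).flatten = il := by
  induction il with
  | nil => rfl
  | cons x xs ih => simp [ih]

-- flatMap = flatten of map (to connect A's flatMap form with B's chunks)
theorem flatMap_eq_flatten_map (il : List String) (f : String → List String) :
    il.flatMap f = (il.map f).flatten := by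
  induction il with
  | nil => rfl
  | cons x xs ih => simp [ih]

-- B's result is enumerate of the flattened chunks, 1-based.
theorem alt_eq_enumerate (il : List String) (dl : List (String × List String))
    (onl : Bool) :
    initialize_image_dict_from_list_alt il dl onl
      = PySem.List.enumerate
          ((if onl then
              il.map (fun image =>
                let l := (PySem.Dict.mk dl).getD image []
                if l ≠ [] then l else [image])
            else il.map (fun image => [image])).flatten) 1 := by
  have stage23 : ∀ (chunks : List (List String)),
      (PySem.Dict.ofList ((chunks.zip (chunks.foldl
          (fun os chunk => os ++ [(os.getLast?.getD 0) + (chunk.length : Int)]) [1])).flatMap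
          (fun p => PySem.List.enumerate p.1 p.2))).items
        = PySem.List.enumerate chunks.flatten 1 := by
    intro chunks
    rw [offsets_fold chunks [1] 1 (by simp), List.singleton_append, zip_offsets_flatMap,
        ofList_enumerate_items]
  unfold initialize_image_dict_from_list_alt
  exact stage23 _

-- ===== VERDICT (by name: the statement is the Claim_ definition above) =====
theorem initialize_image_dict_from_list_spec : Claim_equal_initialize_image_dict_from_list := by
  intro il dl onl _ _
  unfold Spec_initialize_image_dict_from_list
  rw [alt_eq_enumerate]
  unfold initialize_image_dict_from_list
  cases onl with
  | false =>
    simp only [Bool.false_eq_true, if_false]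
    rw [flat_fold il 1 PySem.Dict.empty (by simp), flatten_map_singleton]
    simp [PySem.Dict.empty]
  | true =>
    simp only [if_true]
    rw [outer_fold_eq dl il 1 PySem.Dict.empty (by simp),
        ← flatMap_eq_flatten_map]
    simp [PySem.Dict.empty]
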